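-- pv_equiv track=rewrite | github.com/roblesi/FiestaBoard | src/templates/engine.py | _truncate_to_tiles
-- ===== SOURCE A (Python) =====
-- COLOR_CODES = {
--     "red": 63,
--     "orange": 64,
--     "yellow": 65,
--     "green": 66,
--     "blue": 67,
--     "violet": 68,
--     "purple": 68,  # alias
--     "white": 69,
--     "black": 70,
-- }
--
-- def _truncate_to_tiles(text: str, max_tiles: int = 22) -> str:
--     """Truncate text to max_tiles, where color markers count as 1 tile each.
--
--     Args:
--         text: Rendered text string (may contain color markers like {66})
--         max_tiles: Maximum number of tiles (characters + color markers)
--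
--     Returns:
--         Truncated string that fits within max_tiles
--     """
--     # Count tiles (characters + color markers) and truncate appropriately
--     result = []
--     tile_count = 0
--     i = 0
--
--     while i < len(text) and tile_count < max_tiles:
--         # Check for color marker
--         if text[i] == "{":
--             closing_brace = text.find("}", i)
--             if closing_brace != -1:
--                 content = text[i + 1:closing_brace]
--                 # Check if it's a color code (numeric 63-70 or named)
--                 if content.isdigit():
--                     code = int(content)
--                     if 63 <= code <= 70:
--                         # Numeric color code like {66} or {70}
--                         result.append(text[i:closing_brace + 1])
--                         tile_count += 1
--                         i = closing_brace + 1
--                         continue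
--                 elif content.lower() in COLOR_CODES:
--                     # Named color like {green}
--                     result.append(text[i:closing_brace + 1])
--                     tile_count += 1
--                     i = closing_brace + 1
--                     continue
--                 elif content.startswith("/"):
--                     # End tag - skip it
--                     i = closing_brace + 1
--                     continue
--
--         # Regular character
--         result.append(text[i])
--         tile_count += 1
--         i += 1
--
--     return "".join(result)
-- ===== SOURCE B (Python) =====
-- COLOR_CODES = {
--     "red": 63,
--     "orange": 64,
--     "yellow": 65,
--     "green": 66,
--     "blue": 67,
--     "violet": 68,
--     "purple": 68,  # alias
--     "white": 69,
--     "black": 70,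
-- }
--
--
-- def _is_marker(content):
--     """A brace content that renders as one color tile."""
--     if content.isdigit():
--         return 63 <= int(content) <= 70
--     return content.lower() in COLOR_CODES
--
--
-- def _tokenize(text):
--     """Split text into tiles (regular chars and color markers); end tags vanish."""
--     tokens = []
--     i = 0
--     n = len(text)
--     while i < n:
--         if text[i] == "{":
--             j = text.find("}", i)
--             if j != -1:
--                 content = text[i + 1:j]
--                 if _is_marker(content):
--                     tokens.append(text[i:j + 1])
--                     i = j + 1
--                     continue
--                 if content.startswith("/"):
--                     i = j + 1
--                     continue
--         tokens.append(text[i])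
--         i += 1
--     return tokens
--
--
-- def _truncate_to_tiles(text: str, max_tiles: int = 22) -> str:
--     return "".join(_tokenize(text)[:max(0, max_tiles)])
-- ===== Notes on version B (the rewrite author's own statement) =====
-- stated objective: alternative
-- what changed: B splits A's interleaved count-and-stop scan into two phases: a tokenizer that turns the whole string into a list of tile strings (with a single _is_marker predicate and end tags dropped), followed by a plain list slice and join to enforce the tile budget.
import Mathlib
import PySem

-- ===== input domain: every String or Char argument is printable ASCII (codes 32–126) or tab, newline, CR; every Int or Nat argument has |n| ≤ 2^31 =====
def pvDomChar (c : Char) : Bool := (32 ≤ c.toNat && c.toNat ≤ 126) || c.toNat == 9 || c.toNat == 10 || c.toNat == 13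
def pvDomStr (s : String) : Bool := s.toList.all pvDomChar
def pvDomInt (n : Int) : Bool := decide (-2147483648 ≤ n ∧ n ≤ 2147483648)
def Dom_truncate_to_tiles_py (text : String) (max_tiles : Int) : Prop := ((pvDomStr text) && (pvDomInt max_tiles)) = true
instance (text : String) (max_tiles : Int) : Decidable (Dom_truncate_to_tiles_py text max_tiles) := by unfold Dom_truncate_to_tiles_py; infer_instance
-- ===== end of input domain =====

-- B re-decomposes A's interleaved count-and-stop scan into tokenize-then-slice (same cost); return value equivalence proved below.

-- COLOR_CODES, shared module constant (keys as char lists; values as Int)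
def pvCOLOR_CODES : PySem.Dict (List Char) Int :=
  (((((((((PySem.Dict.empty.insert ['r','e','d'] 63).insert ['o','r','a','n','g','e'] 64).insert
    ['y','e','l','l','o','w'] 65).insert ['g','r','e','e','n'] 66).insert ['b','l','u','e'] 67).insert
    ['v','i','o','l','e','t'] 68).insert ['p','u','r','p','l','e'] 68).insert ['w','h','i','t','e'] 69).insert
    ['b','l','a','c','k'] 70)

-- ===== PORT A =====
-- A's while loop: state (i, tile_count, result); fuel only makes the recursion total
-- (each iteration advances i by at least 1, so text.length + 1 steps always suffice).
-- text[i] inside the loop is ported as getD (the guard gives i < length); int(content) is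
-- ported as (ofChars? content).getD 0 (guarded by isdigit, where Python's int never raises).
def pvTruncGoA (s : List Char) (max_tiles : Int) : Nat → Nat → Int → List Char → List Char
  | 0, _, _, acc => acc
  | fuel+1, i, count, acc =>
    if i < s.length ∧ count < max_tiles then
      if s[i]? = some '{' then
        let cb := PySem.Chars.findFrom s ['}'] (i : Int) none
        if cb ≠ -1 then
          let content := PySem.List.slice s (some ((i : Int) + 1)) (some cb)
          if PySem.Chars.strIsdigit content then
            if 63 ≤ (PySem.Int.ofChars? content).getD 0 ∧ (PySem.Int.ofChars? content).getD 0 ≤ 70 then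
              pvTruncGoA s max_tiles fuel (cb + 1).toNat (count + 1)
                (acc ++ PySem.List.slice s (some (i : Int)) (some (cb + 1)))
            else
              pvTruncGoA s max_tiles fuel (i + 1) (count + 1) (acc ++ [s.getD i ' '])
          else if PySem.Dict.contains pvCOLOR_CODES (PySem.Chars.lower content) then
            pvTruncGoA s max_tiles fuel (cb + 1).toNat (count + 1)
              (acc ++ PySem.List.slice s (some (i : Int)) (some (cb + 1)))
          else if PySem.Chars.startswith content ['/'] then
            pvTruncGoA s max_tiles fuel (cb + 1).toNat count acc
          else
            pvTruncGoA s max_tiles fuel (i + 1) (count + 1) (acc ++ [s.getD i ' '])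
        else
          pvTruncGoA s max_tiles fuel (i + 1) (count + 1) (acc ++ [s.getD i ' '])
      else
        pvTruncGoA s max_tiles fuel (i + 1) (count + 1) (acc ++ [s.getD i ' '])
    else acc

def truncate_to_tiles_py (text : String) (max_tiles : Int) : String :=
  String.ofList (pvTruncGoA text.toList max_tiles (text.toList.length + 1) 0 0 [])

-- ===== PORT B =====
-- Source B's _is_marker
def pvIsMarker (content : List Char) : Bool :=
  if PySem.Chars.strIsdigit content then
    decide (63 ≤ (PySem.Int.ofChars? content).getD 0 ∧ (PySem.Int.ofChars? content).getD 0 ≤ 70)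
  else PySem.Dict.contains pvCOLOR_CODES (PySem.Chars.lower content)

-- Source B's _tokenize while loop (state i, accumulated tokens returned as cons); same fuel discipline as A's port
def pvTokenizeGo (s : List Char) : Nat → Nat → List (List Char)
  | 0, _ => []
  | fuel+1, i =>
    if i < s.length then
      if s[i]? = some '{' then
        let j := PySem.Chars.findFrom s ['}'] (i : Int) none
        if j ≠ -1 then
          let content := PySem.List.slice s (some ((i : Int) + 1)) (some j)
          if pvIsMarker content then
            PySem.List.slice s (some (i : Int)) (some (j + 1)) :: pvTokenizeGo s fuel (j + 1).toNat
          else if PySem.Chars.startswith content ['/'] then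
            pvTokenizeGo s fuel (j + 1).toNat
          else [s.getD i ' '] :: pvTokenizeGo s fuel (i + 1)
        else [s.getD i ' '] :: pvTokenizeGo s fuel (i + 1)
      else [s.getD i ' '] :: pvTokenizeGo s fuel (i + 1)
    else []

-- "".join(_tokenize(text)[:max(0, max_tiles)])
def truncate_to_tiles_py_alt (text : String) (max_tiles : Int) : String :=
  String.ofList
    ((PySem.List.slice (pvTokenizeGo text.toList (text.toList.length + 1) 0) none
        (some (max 0 max_tiles))).flatten)

-- ===== PRECONDITION & SPEC =====
def Spec_truncate_to_tiles_py (text : String) (max_tiles : Int) (out : String) : Prop := out = truncate_to_tiles_py_alt text max_tiles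
instance (text : String) (max_tiles : Int) (out : String) : Decidable (Spec_truncate_to_tiles_py text max_tiles out) := by unfold Spec_truncate_to_tiles_py; infer_instance

-- ===== CLAIM (what is proved, stated in full; the proofs are below) =====
def Claim_equal_truncate_to_tiles_py : Prop := ∀ (text : String) (max_tiles : Int), Dom_truncate_to_tiles_py text max_tiles → Spec_truncate_to_tiles_py text max_tiles (truncate_to_tiles_py text max_tiles)

-- ===== LEMMAS AND PROOFS =====

-- a digit-only brace content cannot be an end tag
theorem pv_digit_not_slash (c : List Char) (h : PySem.Chars.strIsdigit c = true) :
    PySem.Chars.startswith c ['/'] = false := by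
  cases c with
  | nil => simp [PySem.Chars.strIsdigit] at h
  | cons a t =>
    simp [PySem.Chars.strIsdigit, PySem.Chars.isdigit, List.all_cons] at h
    have h0 : '0' ≤ a := h.1.1
    simp [PySem.Chars.startswith, List.isPrefixOf]
    intro he
    subst he
    exact absurd h0 (by decide)

-- main invariant: A's interleaved loop equals "take (budget) of B's token stream, flattened"
theorem pv_go_eq (s : List Char) (m : Int) :
    ∀ (fuel i : Nat) (count : Int) (acc : List Char),
      pvTruncGoA s m fuel i count acc
        = acc ++ (List.take (m - count).toNat (pvTokenizeGo s fuel i)).flatten := by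
  intro fuel
  induction fuel with
  | zero => intro i count acc; simp [pvTruncGoA, pvTokenizeGo]
  | succ fuel ih =>
    intro i count acc
    by_cases hi : i < s.length
    · by_cases hc : count < m
      · have htn : (m - count).toNat = (m - (count + 1)).toNat + 1 := by omega
        by_cases hbrace : s[i]? = some '{'
        · by_cases hcb : PySem.Chars.findFrom s ['}'] (i : Int) none = -1
          · simp only [pvTruncGoA, pvTokenizeGo, hi, hc, hbrace, hcb, and_self, ite_true,
              ite_false, not_true, ne_eq]
            rw [ih, htn, List.take_succ_cons, List.flatten_cons, List.append_assoc]
          · set content := PySem.List.slice s (some ((i : Int) + 1))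
              (some (PySem.Chars.findFrom s ['}'] (i : Int) none)) with hcontent
            by_cases hd : PySem.Chars.strIsdigit content = true
            · have hns := pv_digit_not_slash content hd
              by_cases hr : 63 ≤ (PySem.Int.ofChars? content).getD 0 ∧ (PySem.Int.ofChars? content).getD 0 ≤ 70
              · have hm : pvIsMarker content = true := by simp [pvIsMarker, hd, hr]
                simp only [pvTruncGoA, pvTokenizeGo, ← hcontent, hm, hi, hc, hbrace, hcb, hd,
                  hr, and_self, ite_true, ne_eq, not_false_eq_true]
                rw [ih, htn, List.take_succ_cons, List.flatten_cons, List.append_assoc]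
              · have hm : pvIsMarker content = false := by simp [pvIsMarker, hd, hr]
                simp only [pvTruncGoA, pvTokenizeGo, ← hcontent, hm, hi, hc, hbrace, hcb, hd,
                  hr, hns, and_self, ite_true, ite_false, ne_eq, not_false_eq_true,
                  Bool.false_eq_true]
                rw [ih, htn, List.take_succ_cons, List.flatten_cons, List.append_assoc]
            · by_cases hk : PySem.Dict.contains pvCOLOR_CODES (PySem.Chars.lower content) = true
              · have hm : pvIsMarker content = true := by simp [pvIsMarker, hd, hk]
                simp only [pvTruncGoA, pvTokenizeGo, ← hcontent, hm, hi, hc, hbrace, hcb, hd,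
                  hk, and_self, ite_true, ite_false, ne_eq, not_false_eq_true,
                  Bool.false_eq_true]
                rw [ih, htn, List.take_succ_cons, List.flatten_cons, List.append_assoc]
              · have hm : pvIsMarker content = false := by
                  simp [pvIsMarker, hd]; simpa using hk
                by_cases hsl : PySem.Chars.startswith content ['/'] = true
                · simp only [pvTruncGoA, pvTokenizeGo, ← hcontent, hm, hi, hc, hbrace, hcb, hd,
                    hk, hsl, and_self, ite_true, ite_false, ne_eq, not_false_eq_true,
                    Bool.false_eq_true]
                  rw [ih]
                · simp only [pvTruncGoA, pvTokenizeGo, ← hcontent, hm, hi, hc, hbrace, hcb, hd,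
                    hk, hsl, and_self, ite_true, ite_false, ne_eq, not_false_eq_true,
                    Bool.false_eq_true]
                  rw [ih, htn, List.take_succ_cons, List.flatten_cons, List.append_assoc]
        · simp only [pvTruncGoA, pvTokenizeGo, hi, hc, hbrace, and_self, ite_true, ite_false]
          rw [ih, htn, List.take_succ_cons, List.flatten_cons, List.append_assoc]
      · have h0 : (m - count).toNat = 0 := by omega
        have hg : ¬ (i < s.length ∧ count < m) := by tauto
        simp [pvTruncGoA, if_neg hg, h0]
    · have hg : ¬ (i < s.length ∧ count < m) := by tauto
      simp [pvTruncGoA, pvTokenizeGo, if_neg hg, if_neg hi]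

-- ===== VERDICT (by name: the statement is the Claim_ definition above) =====
theorem truncate_to_tiles_py_spec : Claim_equal_truncate_to_tiles_py := by
  unfold Claim_equal_truncate_to_tiles_py Spec_truncate_to_tiles_py
  intro text m _
  unfold truncate_to_tiles_py truncate_to_tiles_py_alt
  rw [PySem.List.slice_to _ (le_max_left 0 m), pv_go_eq]
  have : (max 0 m).toNat = (m - 0).toNat := by omega
  rw [this, List.nil_append]
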